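-- pv_equiv track=rewrite | github.com/Eeap/Algorithm | CodeSignal/incorrectPasscodeAttempts.py | solution
-- ===== SOURCE A (Python) =====
-- def solution(passcode, attempts):
--     cnt = 0
--     lock = False
--     for at in attempts:
--         if at == passcode:
--             cnt = 0
--         else:
--             cnt+=1
--         if cnt > 9:
--             lock = True
--             break
--     return lock
-- ===== SOURCE B (Python) =====
-- def solution(passcode, attempts):
--     s = attempts
--     while len(s) >= 10:
--         if all(a != passcode for a in s[:10]):
--             return True
--         s = s[1:]
--     return False
-- ===== Notes on version B (the rewrite author's own statement) =====
-- stated objective: alternative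
-- what changed: B slides a window of 10 over the attempts and returns True iff some window is entirely wrong, instead of A's running wrong-counter that resets on a correct attempt and breaks past 9.
import Mathlib
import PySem

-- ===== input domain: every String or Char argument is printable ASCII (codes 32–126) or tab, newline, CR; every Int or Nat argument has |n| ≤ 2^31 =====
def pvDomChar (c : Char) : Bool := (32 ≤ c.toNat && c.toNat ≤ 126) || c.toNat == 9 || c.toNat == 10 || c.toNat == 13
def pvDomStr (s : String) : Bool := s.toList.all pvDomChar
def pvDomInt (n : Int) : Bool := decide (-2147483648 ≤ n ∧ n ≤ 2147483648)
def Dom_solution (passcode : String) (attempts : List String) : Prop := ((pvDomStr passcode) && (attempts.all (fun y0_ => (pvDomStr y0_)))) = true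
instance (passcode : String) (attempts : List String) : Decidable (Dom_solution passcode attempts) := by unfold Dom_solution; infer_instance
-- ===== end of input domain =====

-- B checks each window of 10 consecutive attempts for being all wrong (sliding window)
-- instead of A's running wrong-counter with reset; alternative decomposition, same cost class.


-- ===== PORT A =====
-- the for-loop with the running counter and the break, as structural recursion over attempts
def solLoopA (passcode : String) (cnt : Int) : List String → Bool
  | [] => false
  | at_ :: rest =>
      let c : Int := if at_ == passcode then 0 else cnt + 1
      if c > 9 then true else solLoopA passcode c rest

def solution (passcode : String) (attempts : List String) : Bool :=
  solLoopA passcode 0 attempts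

-- ===== PORT B =====
-- the while-loop: s[:10] = List.take 10, s[1:] = the tail (slice with nonnegative in-range bounds)
def solLoopB (passcode : String) : List String → Bool
  | [] => false
  | a :: rest =>
      if 10 ≤ (a :: rest).length then
        if ((a :: rest).take 10).all (fun x => x != passcode) then true
        else solLoopB passcode rest
      else false

def solution_alt (passcode : String) (attempts : List String) : Bool :=
  solLoopB passcode attempts

-- ===== PRECONDITION & SPEC =====
def Spec_solution (passcode : String) (attempts : List String) (out : Bool) : Prop := out = solution_alt passcode attempts
instance (passcode : String) (attempts : List String) (out : Bool) : Decidable (Spec_solution passcode attempts out) := by unfold Spec_solution; infer_instance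

-- ===== CLAIM (what is proved, stated in full; the proofs are below) =====
def Claim_equal_solution : Prop := ∀ (passcode : String) (attempts : List String), Dom_solution passcode attempts → Spec_solution passcode attempts (solution passcode attempts)

-- ===== LEMMAS AND PROOFS =====

-- "the first m attempts exist and are all wrong"
def wp (passcode : String) (m : Nat) (l : List String) : Bool :=
  decide (m ≤ l.length) && (l.take m).all (fun x => x != passcode)

theorem wp_mono {passcode : String} {m n : Nat} (h : m ≤ n) {l : List String}
    (hw : wp passcode n l = true) : wp passcode m l = true := by
  simp only [wp, Bool.and_eq_true, decide_eq_true_eq] at *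
  refine ⟨le_trans h hw.1, ?_⟩
  have hall := hw.2
  rw [List.all_eq_true] at hall ⊢
  intro x hx
  have hx' : x ∈ List.take m (List.take n l) := by
    rwa [List.take_take, min_eq_left h]
  exact hall x (List.take_subset m _ hx')

theorem loopB_short {passcode : String} {l : List String} (h : l.length < 10) :
    solLoopB passcode l = false := by
  cases l with
  | nil => rfl
  | cons a rest =>
      simp only [solLoopB]
      rw [if_neg (Nat.not_le.mpr h)]

theorem loopB_cons (passcode : String) (a : String) (rest : List String) :
    solLoopB passcode (a :: rest) = (wp passcode 10 (a :: rest) || solLoopB passcode rest) := by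
  by_cases h : 10 ≤ (a :: rest).length
  · have hwp : wp passcode 10 (a :: rest) = ((a :: rest).take 10).all (fun x => x != passcode) := by
      unfold wp; rw [decide_eq_true h, Bool.true_and]
    rw [hwp]
    simp only [solLoopB]
    rw [if_pos h]
    cases ((a :: rest).take 10).all (fun x => x != passcode) <;> simp
  · have hwp : wp passcode 10 (a :: rest) = false := by
      unfold wp; rw [decide_eq_false h, Bool.false_and]
    have hr : rest.length < 10 := by
      have := Nat.not_le.mp h; simp at this; omega
    simp only [solLoopB]
    rw [if_neg h, hwp, loopB_short hr, Bool.false_or]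

theorem wp_absorb_loopB (passcode : String) (l : List String) :
    (wp passcode 10 l || solLoopB passcode l) = solLoopB passcode l := by
  cases l with
  | nil =>
      have : wp passcode 10 ([] : List String) = false := by
        unfold wp; rw [decide_eq_false (by simp), Bool.false_and]
      rw [this, Bool.false_or]
  | cons a rest =>
      rw [loopB_cons]
      cases hwp : wp passcode 10 (a :: rest) <;> simp

theorem or_absorb {a b c : Bool} (h : b = true → a = true) : (a || (b || c)) = (a || c) := by
  cases hb : b
  · rfl
  · simp [h hb]

-- wp over a cons: a correct head kills every nonempty window …
theorem wp_correct_head {passcode a : String} (hc : (a == passcode) = true)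
    (rest : List String) (m : Nat) (hm : 1 ≤ m) : wp passcode m (a :: rest) = false := by
  cases m with
  | zero => omega
  | succ m' =>
      have hbne : (a != passcode) = false := by simp [bne, hc]
      unfold wp
      rw [List.take_succ_cons, List.all_cons, hbne, Bool.false_and, Bool.and_false]

-- … and a wrong head peels off
theorem wp_wrong_head {passcode a : String} (hc : (a == passcode) = false)
    (rest : List String) (m : Nat) : wp passcode (m + 1) (a :: rest) = wp passcode m rest := by
  have hbne : (a != passcode) = true := by simp [bne, hc]
  unfold wp
  rw [List.take_succ_cons, List.all_cons, hbne, Bool.true_and, List.length_cons,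
    decide_eq_decide.mpr (by omega : m + 1 ≤ rest.length + 1 ↔ m ≤ rest.length)]

theorem loopA_eq (passcode : String) (l : List String) :
    ∀ k : Nat, k ≤ 9 →
      solLoopA passcode (k : Int) l = (wp passcode (10 - k) l || solLoopB passcode l) := by
  induction l with
  | nil =>
      intro k hk
      have hwp : wp passcode (10 - k) ([] : List String) = false := by
        unfold wp; rw [decide_eq_false (by simp; omega), Bool.false_and]
      simp [solLoopA, solLoopB, hwp]
  | cons a rest ih =>
      intro k hk
      by_cases hc : (a == passcode) = true
      · -- correct attempt: counter resets; every window containing it fails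
        have h1 : solLoopA passcode (k : Int) (a :: rest) = solLoopA passcode 0 rest := by
          simp [solLoopA, hc]
        have h2 := ih 0 (by omega)
        norm_num at h2
        rw [h1, h2, loopB_cons, wp_correct_head hc rest (10 - k) (by omega),
          wp_correct_head hc rest 10 (by omega), Bool.false_or, Bool.false_or,
          wp_absorb_loopB]
      · have hc' : (a == passcode) = false := by
          cases hab : (a == passcode) with
          | false => rfl
          | true => exact absurd hab hc
        by_cases hk9 : k = 9
        · subst hk9
          have hA : solLoopA passcode ((9 : Nat) : Int) (a :: rest) = true := by
            simp only [solLoopA, hc']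
            norm_num
          have hwp : wp passcode 1 (a :: rest) = true := by
            rw [show (1 : Nat) = 0 + 1 from rfl, wp_wrong_head hc']
            unfold wp; simp
          rw [hA, show (10 : Nat) - 9 = 1 from rfl, hwp, Bool.true_or]
        · -- k < 9 : step to counter k + 1
          have hA : solLoopA passcode (k : Int) (a :: rest)
              = solLoopA passcode ((k + 1 : Nat) : Int) rest := by
            have hle : ¬ ((k : Int) + 1 > 9) := by omega
            simp only [solLoopA, hc', if_false, Bool.false_eq_true]
            rw [if_neg hle]
            push_cast
            rfl
          rw [hA, ih (k + 1) (by omega), loopB_cons,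
            show (10 : Nat) - k = (9 - k) + 1 by omega, wp_wrong_head hc' rest (9 - k),
            show (10 : Nat) = 9 + 1 from rfl, wp_wrong_head hc' rest 9,
            show (10 : Nat) - (k + 1) = 9 - k by omega]
          exact (or_absorb (wp_mono (show 9 - k ≤ 9 by omega))).symm

-- ===== VERDICT (by name: the statement is the Claim_ definition above) =====
theorem solution_spec : Claim_equal_solution := by
  intro passcode attempts _
  unfold Spec_solution solution solution_alt
  have h := loopA_eq passcode attempts 0 (by omega)
  norm_num at h
  rw [h, wp_absorb_loopB]
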